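-- pv_equiv track=rewrite | github.com/AndyT94/EDAN20 | final/lab1/indexer.py | getNbrWords
-- ===== SOURCE A (Python) =====
-- def getNbrWords(files, dict):
--     docWords = {}
--     for file in files:
--         nbrWords = 0
--         for word in dict:
--             i = dict.get(word)
--             if i.get(file) is not None:
--                 nbrWords += len(i.get(file))
--         docWords[file] = nbrWords
--     return docWords
-- ===== SOURCE B (Python) =====
-- def getNbrWords(files, dict):
--     docWords = {file: 0 for file in files}
--     for postings in dict.values():
--         for file, positions in postings.items():
--             if file in docWords:
--                 docWords[file] += len(positions)
--     return docWords
-- ===== Notes on version B (the rewrite author's own statement) =====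
-- stated objective: faster
-- what changed: Instead of rescanning the whole word index once per file with a dict.get lookup per word (files x words lookups), B builds a zero-initialized per-file counter dict once and makes a single pass over all postings, adding each posting list's length to its file's counter.
import Mathlib
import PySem

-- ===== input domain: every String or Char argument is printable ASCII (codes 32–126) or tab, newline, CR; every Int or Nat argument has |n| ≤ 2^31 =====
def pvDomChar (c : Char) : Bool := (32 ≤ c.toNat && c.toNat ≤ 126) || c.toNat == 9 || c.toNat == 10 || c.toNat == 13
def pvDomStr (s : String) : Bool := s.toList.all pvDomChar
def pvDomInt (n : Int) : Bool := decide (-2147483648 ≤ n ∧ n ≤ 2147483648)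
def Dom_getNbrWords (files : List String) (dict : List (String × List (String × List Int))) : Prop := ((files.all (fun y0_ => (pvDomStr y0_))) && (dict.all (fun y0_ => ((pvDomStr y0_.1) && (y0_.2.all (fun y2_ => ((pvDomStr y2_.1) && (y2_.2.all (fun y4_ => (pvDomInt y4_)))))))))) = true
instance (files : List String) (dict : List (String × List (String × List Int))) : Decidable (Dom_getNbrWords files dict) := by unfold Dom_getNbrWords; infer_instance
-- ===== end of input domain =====

-- B replaces A's files×words double scan by one pass over the postings that accumulates
-- into a per-file counter dict initialized to zero (objective: faster, asymptotic).


-- ===== PORT A =====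
def getNbrWords (files : List String) (dict : List (String × List (String × List Int))) : List (String × Int) :=
  (files.foldl (fun (docWords : PySem.Dict String Int) file =>
      let nbrWords : Int := dict.foldl (fun nbr wp =>
        match (PySem.Dict.mk dict).get? wp.1 with
        | some i => match (PySem.Dict.mk i).get? file with
                    | some l => nbr + (l.length : Int)
                    | none => nbr
        | none => nbr) 0
      docWords.insert file nbrWords) PySem.Dict.empty).items

-- ===== PORT B =====
def getNbrWords_alt (files : List String) (dict : List (String × List (String × List Int))) : List (String × Int) :=
  (dict.foldl (fun (c : PySem.Dict String Int) wp =>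
      wp.2.foldl (fun c fp =>
        if c.contains fp.1 then c.modify fp.1 0 (· + (fp.2.length : Int)) else c) c)
    (files.foldl (fun (c : PySem.Dict String Int) f => c.insert f 0) PySem.Dict.empty)).items

-- ===== PRECONDITION & SPEC =====
-- Pre_ excludes association lists with a duplicated word key or a duplicated file key
-- inside a postings list: such lists do not encode any Python dict (dict keys are unique),
-- so no Python input is excluded.
def Pre_getNbrWords (files : List String) (dict : List (String × List (String × List Int))) : Prop :=
  (dict.map Prod.fst).Nodup ∧ ∀ wp ∈ dict, (wp.2.map Prod.fst).Nodup
instance (files : List String) (dict : List (String × List (String × List Int))) : Decidable (Pre_getNbrWords files dict) := by unfold Pre_getNbrWords; infer_instance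
def pvWitness_getNbrWords : List String × (List (String × List (String × List Int))) :=
  (["a", "b"], [("w", [("a", [1, 2]), ("b", [3])]), ("x", [("a", [0])])])
def Spec_getNbrWords (files : List String) (dict : List (String × List (String × List Int))) (out : List (String × Int)) : Prop := out = getNbrWords_alt files dict
instance (files : List String) (dict : List (String × List (String × List Int))) (out : List (String × Int)) : Decidable (Spec_getNbrWords files dict out) := by unfold Spec_getNbrWords; infer_instance

-- ===== CLAIM (what is proved, stated in full; the proofs are below) =====
def Claim_equal_getNbrWords : Prop := ∀ (files : List String) (dict : List (String × List (String × List Int))), Dom_getNbrWords files dict → Pre_getNbrWords files dict → Spec_getNbrWords files dict (getNbrWords files dict)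

-- ===== LEMMAS AND PROOFS =====

-- number of positions the (unique) entry for file f contributes in one postings list
def pvCnt (p : List (String × List Int)) (f : String) : Int :=
  match (PySem.Dict.mk p).get? f with
  | some l => (l.length : Int)
  | none => 0

-- the same as a plain filtered sum over the entries of p
def pvT (p : List (String × List Int)) (f : String) : Int :=
  ((p.filter (fun fp => fp.1 == f)).map (fun fp => (fp.2.length : Int))).sum

-- total count for file f over the whole index
def pvN (dict : List (String × List (String × List Int))) (f : String) : Int :=
  (dict.map (fun wp => pvCnt wp.2 f)).sum

theorem pvT_nil (f : String) : pvT [] f = 0 := rfl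

theorem pvT_cons (fp : String × List Int) (p : List (String × List Int)) (f : String) :
    pvT (fp :: p) f = (if fp.1 = f then (fp.2.length : Int) else 0) + pvT p f := by
  simp [pvT, List.filter_cons]
  split_ifs with h <;> simp_all

theorem pvT_eq_zero_of_not_mem (p : List (String × List Int)) (f : String)
    (h : f ∉ p.map Prod.fst) : pvT p f = 0 := by
  induction p with
  | nil => rfl
  | cons fp rest ih =>
    rw [pvT_cons]
    simp only [List.map_cons, List.mem_cons, not_or] at h
    rw [if_neg (fun hh => h.1 hh.symm), ih h.2]
    ring

theorem pvT_eq_pvCnt (p : List (String × List Int)) (f : String)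
    (h : (p.map Prod.fst).Nodup) : pvT p f = pvCnt p f := by
  induction p with
  | nil => rfl
  | cons fp rest ih =>
    obtain ⟨g, l⟩ := fp
    simp only [List.map_cons, List.nodup_cons] at h
    rw [pvT_cons]
    by_cases hf : g = f
    · have : f ∉ rest.map Prod.fst := hf ▸ h.1
      rw [if_pos hf, pvT_eq_zero_of_not_mem rest f this]
      simp [pvCnt, PySem.Dict.get?_mk_cons, hf]
    · rw [if_neg hf, ih h.2]
      simp [pvCnt, PySem.Dict.get?_mk_cons, hf]

-- A's inner loop over the words sums pvCnt of each postings list (needs unique word keys)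
theorem pvA_inner (dict : List (String × List (String × List Int))) (file : String)
    (hnd : (dict.map Prod.fst).Nodup) (a : Int) :
    dict.foldl (fun nbr wp =>
      match (PySem.Dict.mk dict).get? wp.1 with
      | some i => match (PySem.Dict.mk i).get? file with
                  | some l => nbr + (l.length : Int)
                  | none => nbr
      | none => nbr) a = a + pvN dict file := by
  have hstep : ∀ wp ∈ dict, (PySem.Dict.mk dict).get? wp.1 = some wp.2 := by
    intro wp hwp
    exact PySem.Dict.get?_of_mem_items (d := PySem.Dict.mk dict) hwp hnd
  -- replace the lookup by the entry itself, then fold the sum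
  refine (PySem.List.foldl_congr_mem dict _ (fun nbr wp => nbr + pvCnt wp.2 file) a ?_).trans ?_
  · intro nbr wp hwp
    rw [hstep wp hwp]
    unfold pvCnt
    rcases h : (PySem.Dict.mk wp.2).get? file with _ | l <;> simp [h]
  · rw [PySem.List.foldl_add]
    rfl

-- keys are untouched by B's posting loop
theorem pvB_keys (p : List (String × List Int)) (c : PySem.Dict String Int) :
    (p.foldl (fun c fp =>
      if c.contains fp.1 then c.modify fp.1 0 (· + (fp.2.length : Int)) else c) c).keys = c.keys := by
  induction p generalizing c with
  | nil => rfl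
  | cons fp rest ih =>
    simp only [List.foldl_cons]
    rw [ih]
    split_ifs with h
    · rw [PySem.Dict.keys_modify]
      exact PySem.Dict.keys_insert_of_contains _ _ h
    · rfl

theorem pvB_inner (p : List (String × List Int)) (c : PySem.Dict String Int) (k : String) :
    (p.foldl (fun c fp =>
      if c.contains fp.1 then c.modify fp.1 0 (· + (fp.2.length : Int)) else c) c).getD k 0 =
      c.getD k 0 + (if c.contains k then pvT p k else 0) := by
  induction p generalizing c with
  | nil => simp [pvT_nil]
  | cons fp rest ih =>
    simp only [List.foldl_cons]
    by_cases h : c.contains fp.1 = true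
    · rw [if_pos h, ih, pvT_cons]
      have hck : (c.modify fp.1 0 (· + (fp.2.length : Int))).contains k = c.contains k := by
        rw [PySem.Dict.contains_modify]
        by_cases hx : k = fp.1
        · simp [hx, h]
        · simp [hx]
      rw [hck, PySem.Dict.getD_modify]
      by_cases hk : k = fp.1
      · subst hk
        rw [if_pos rfl, if_pos rfl, if_pos h, if_pos h]
        ring
      · rw [if_neg hk]
        simp only [if_neg (fun hh : fp.1 = k => hk hh.symm), zero_add]
    · rw [if_neg h, ih, pvT_cons]
      by_cases hk : fp.1 = k
      · subst hk
        simp only [Bool.not_eq_true] at h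
        simp [h]
      · simp only [if_neg hk, zero_add]

-- B's outer loop adds pvN at every key present in c, and keeps c's keys
theorem pvB_outer_keys (dict : List (String × List (String × List Int))) (c : PySem.Dict String Int) :
    (dict.foldl (fun c wp =>
      wp.2.foldl (fun c fp =>
        if c.contains fp.1 then c.modify fp.1 0 (· + (fp.2.length : Int)) else c) c) c).keys = c.keys := by
  induction dict generalizing c with
  | nil => rfl
  | cons wp rest ih => simp only [List.foldl_cons]; rw [ih, pvB_keys]

theorem pvContains_eq_of_keys_eq (c d : PySem.Dict String Int) (h : c.keys = d.keys) (k : String) :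
    c.contains k = d.contains k := by
  rw [PySem.Dict.contains_eq_decide_mem_keys, PySem.Dict.contains_eq_decide_mem_keys, h]

theorem pvB_outer (dict : List (String × List (String × List Int))) (c : PySem.Dict String Int)
    (hin : ∀ wp ∈ dict, (wp.2.map Prod.fst).Nodup) (k : String) :
    (dict.foldl (fun c wp =>
      wp.2.foldl (fun c fp =>
        if c.contains fp.1 then c.modify fp.1 0 (· + (fp.2.length : Int)) else c) c) c).getD k 0 =
      c.getD k 0 + (if c.contains k then pvN dict k else 0) := by
  induction dict generalizing c with
  | nil => simp [pvN]
  | cons wp rest ih =>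
    simp only [List.foldl_cons]
    rw [ih _ (fun x hx => hin x (List.mem_cons_of_mem _ hx)), pvB_inner,
      pvContains_eq_of_keys_eq _ c (pvB_keys wp.2 c) k]
    have : pvT wp.2 k = pvCnt wp.2 k := pvT_eq_pvCnt _ _ (hin wp (List.mem_cons_self ..))
    simp only [pvN, List.map_cons, List.sum_cons, this]
    split_ifs with h
    · ring
    · ring

-- the zero-initialisation loop (B) and the insert-the-answer loop (A) through getD/keys
theorem pvFoldInsert_getD (files : List String) (g : String → Int) (d : PySem.Dict String Int) (k : String) :
    (files.foldl (fun c f => c.insert f (g f)) d).getD k 0 =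
      if k ∈ files then g k else d.getD k 0 := by
  induction files generalizing d with
  | nil => simp
  | cons f rest ih =>
    simp only [List.foldl_cons]
    rw [ih]
    by_cases hr : k ∈ rest
    · simp [hr]
    · by_cases hk : k = f <;> simp [hr, hk, PySem.Dict.getD_insert]

theorem pvFoldInsert_keys (files : List String) (g : String → Int) :
    (files.foldl (fun c f => c.insert f (g f)) PySem.Dict.empty).keys = PySem.Set.ofList files := by
  rw [PySem.Dict.keys_foldl_insert]
  simp [PySem.Dict.keys_empty, PySem.Set.update_nil_left]

theorem pvFoldInsert_nodup (files : List String) (g : String → Int) :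
    (files.foldl (fun c f => c.insert f (g f)) PySem.Dict.empty).keys.Nodup :=
  PySem.Dict.nodup_keys_foldl_insert files _ PySem.Dict.empty PySem.Dict.nodup_keys_empty

theorem pvItems_eq_of (c d : PySem.Dict String Int) (hc : c.keys.Nodup)
    (hk : c.keys = d.keys) (hv : ∀ k, c.getD k 0 = d.getD k 0) : c.items = d.items := by
  rw [PySem.Dict.items_eq_map_keys c hc 0, PySem.Dict.items_eq_map_keys d (hk ▸ hc) 0, hk]
  exact List.map_congr_left (fun k _ => by rw [hv k])

-- ===== VERDICT (by name: the statement is the Claim_ definition above) =====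
theorem getNbrWords_spec : Claim_equal_getNbrWords := by
  intro files dict _ hpre
  unfold Spec_getNbrWords getNbrWords getNbrWords_alt
  obtain ⟨hout, hin⟩ := hpre
  have hAform : (files.foldl (fun (docWords : PySem.Dict String Int) file =>
      let nbrWords : Int := dict.foldl (fun nbr wp =>
        match (PySem.Dict.mk dict).get? wp.1 with
        | some i => match (PySem.Dict.mk i).get? file with
                    | some l => nbr + (l.length : Int)
                    | none => nbr
        | none => nbr) 0
      docWords.insert file nbrWords) PySem.Dict.empty) =
      files.foldl (fun c f => c.insert f (pvN dict f)) PySem.Dict.empty := by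
    apply PySem.List.foldl_congr_mem
    intro c f _
    simp only
    rw [pvA_inner dict f hout 0, zero_add]
  rw [hAform]
  apply pvItems_eq_of
  · exact pvFoldInsert_nodup files _
  · rw [pvFoldInsert_keys files (fun _ => pvN dict _), pvB_outer_keys,
      pvFoldInsert_keys files (fun _ => 0)]
  · intro k
    rw [pvFoldInsert_getD, pvB_outer dict _ hin k, pvFoldInsert_getD]
    have hkeys : (files.foldl (fun c f => c.insert f (0 : Int)) PySem.Dict.empty).keys
        = PySem.Set.ofList files := pvFoldInsert_keys files (fun _ => 0)
    have hmem : ((files.foldl (fun c f => c.insert f (0 : Int)) PySem.Dict.empty).contains k = true)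
        ↔ k ∈ files := by
      rw [PySem.Dict.contains_iff_mem_keys, hkeys, PySem.Set.mem_ofList]
    by_cases hk : k ∈ files
    · rw [if_pos hk, if_pos hk, if_pos (hmem.mpr hk)]
      ring
    · rw [if_neg hk, if_neg hk, if_neg (fun hh => hk (hmem.mp hh))]
      ring
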